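-- pv_equiv track=rewrite | github.com/noeltiju/Semester-1 | Math assignment/row_reduction.py | pivot_rows_maker
-- ===== SOURCE A (Python) =====
-- def pivot_rows_maker(matrix,cols):
--     pivots = [0 for i in matrix]
--     for i in range(len(cols)):
--         col = cols[i]
--         index = 0
--         for j in range(len(col)):
--             element = col[j]
--             if element == 1:
--                 index = j
--                 continue
--
--             if element != 0:
--                 break
--
--         else:
--
--             pivots[index] = 1
--
--     return pivots
-- ===== SOURCE B (Python) =====
-- def pivot_rows_maker(matrix, cols):
--     pivots = [0] * len(matrix)
--     for col in cols:
--         if col.count(0) + col.count(1) == len(col):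
--             rev = col[::-1]
--             idx = len(col) - 1 - rev.index(1) if 1 in rev else 0
--             pivots[idx] = 1
--     return pivots
-- ===== Notes on version B (the rewrite author's own statement) =====
-- stated objective: alternative
-- what changed: A validates and locates the pivot in one fused left-to-right break/else loop tracking a running index; B decides validity arithmetically by occurrence counting (count(0)+count(1)==len) and locates the last 1 from the opposite end as len-1-reversed.index(1), with no per-element scan loop of its own.
import Mathlib
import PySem

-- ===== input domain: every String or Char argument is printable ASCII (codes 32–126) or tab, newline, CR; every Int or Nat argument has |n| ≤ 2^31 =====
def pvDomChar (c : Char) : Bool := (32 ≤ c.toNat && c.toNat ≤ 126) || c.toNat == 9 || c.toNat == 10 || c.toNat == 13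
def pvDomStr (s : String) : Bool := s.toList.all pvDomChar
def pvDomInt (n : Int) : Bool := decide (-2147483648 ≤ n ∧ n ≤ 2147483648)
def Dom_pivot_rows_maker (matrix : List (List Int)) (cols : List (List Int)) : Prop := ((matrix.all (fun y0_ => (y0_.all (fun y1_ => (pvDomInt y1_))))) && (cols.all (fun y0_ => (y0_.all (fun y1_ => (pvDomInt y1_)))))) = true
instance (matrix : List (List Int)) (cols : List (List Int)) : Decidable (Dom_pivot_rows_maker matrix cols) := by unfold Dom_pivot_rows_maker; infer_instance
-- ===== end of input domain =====

-- ===== PORT A =====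
-- B changes A's fused break/else scan into count-based validity plus a reversed .index
-- lookup of the last 1 (objective: alternative); return value only — A mutates no argument.

-- A's inner 'for j in range(len(col))' loop with its for/else: returns the final 'index'
-- when the loop completes (some), none when it breaks on an element that is neither 0 nor 1
def pvA_scan : List Int → Int → Int → Option Int
  | [], _, index => some index
  | e :: rest, j, index =>
    if e == 1 then pvA_scan rest (j + 1) j
    else if e != 0 then none
    else pvA_scan rest (j + 1) index

def pivot_rows_maker (matrix : List (List Int)) (cols : List (List Int)) : List Int :=
  cols.foldl (fun pivots col =>
      match pvA_scan col 0 0 with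
      | some index => PySem.List.pySetD pivots index 1    -- pivots[index] = 1 (in range under Pre_)
      | none => pivots)
    (matrix.map (fun _ => (0 : Int)))

-- ===== PORT B =====
def pivot_rows_maker_alt (matrix : List (List Int)) (cols : List (List Int)) : List Int :=
  cols.foldl (fun pivots col =>
      if PySem.List.count col 0 + PySem.List.count col 1 == col.length then
        let rev := col.reverse      -- col[::-1]; exact by PySem.List.slice?_none_none_neg_one
        -- idx = len(col) - 1 - rev.index(1) if 1 in rev else 0  (index guarded by membership)
        let idx : Int := if rev.contains 1 then
            (col.length : Int) - 1 - (((PySem.List.index? rev 1).getD 0 : Nat) : Int)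
          else 0
        PySem.List.pySetD pivots idx 1                   -- pivots[idx] = 1 (in range under Pre_)
      else pivots)
    (List.replicate matrix.length (0 : Int))             -- [0] * len(matrix)

-- ===== PRECONDITION & SPEC =====
-- Pre_ excludes exactly the inputs where both Pythons raise IndexError on pivots[idx] = 1: some
-- column of 0s and 1s whose pivot index (last 1, default 0) is not a row index of matrix.
def Pre_pivot_rows_maker (matrix : List (List Int)) (cols : List (List Int)) : Prop :=
  ∀ col ∈ cols, (∀ e ∈ col, e = 0 ∨ e = 1) →
    0 < matrix.length ∧ ∀ p ∈ PySem.List.enumerate col, p.2 = 1 → p.1 < (matrix.length : Int)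
instance (matrix : List (List Int)) (cols : List (List Int)) : Decidable (Pre_pivot_rows_maker matrix cols) := by unfold Pre_pivot_rows_maker; infer_instance

def pvWitness_pivot_rows_maker : List (List Int) × List (List Int) := ([[0, 1]], [[1], [0, 2]])

def Spec_pivot_rows_maker (matrix : List (List Int)) (cols : List (List Int)) (out : List Int) : Prop := out = pivot_rows_maker_alt matrix cols
instance (matrix : List (List Int)) (cols : List (List Int)) (out : List Int) : Decidable (Spec_pivot_rows_maker matrix cols out) := by unfold Spec_pivot_rows_maker; infer_instance

-- ===== CLAIM (what is proved, stated in full; the proofs are below) =====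
def Claim_equal_pivot_rows_maker : Prop := ∀ (matrix : List (List Int)) (cols : List (List Int)), Dom_pivot_rows_maker matrix cols → Pre_pivot_rows_maker matrix cols → Spec_pivot_rows_maker matrix cols (pivot_rows_maker matrix cols)

-- ===== LEMMAS AND PROOFS =====

-- index list of the 1s of col, enumerated from j
def pvOnes (j : Int) (col : List Int) : List Int :=
  ((PySem.List.enumerate col j).filter (fun p => p.2 == 1)).map (fun p => p.1)

lemma pvOnes_cons (j : Int) (e : Int) (rest : List Int) :
    pvOnes j (e :: rest) = (if e == 1 then [j] else []) ++ pvOnes (j + 1) rest := by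
  by_cases h : e = 1 <;> simp [pvOnes, PySem.List.enumerate_cons, h]

lemma pvCount01_le (col : List Int) : col.count 0 + col.count 1 ≤ col.length := by
  induction col with
  | nil => simp
  | cons e rest ih =>
    by_cases h0 : e = 0
    · simp [h0]; omega
    · by_cases h1 : e = 1 <;> simp [h0, h1] <;> omega

lemma pvValid_iff (col : List Int) :
    (col.count 0 + col.count 1 == col.length) = col.all (fun e => e == 0 || e == 1) := by
  induction col with
  | nil => simp
  | cons e rest ih =>
    by_cases h0 : e = 0
    · simp [h0, ← ih]
      constructor <;> intro h <;> omega
    · by_cases h1 : e = 1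
      · simp [h1, ← ih]
        constructor <;> intro h <;> omega
      · have := pvCount01_le rest
        have hb : (e == (0:Int)) = false ∧ (e == (1:Int)) = false := by
          constructor <;> simp [h0, h1]
        simp [h0, h1, hb.1, hb.2]
        omega

lemma pvOnes_mem_lt (col : List Int) : ∀ (j x : Int), x ∈ pvOnes j col →
    x < j + (col.length : Int) := by
  induction col with
  | nil => intro j x hx; simp [pvOnes] at hx
  | cons e rest ih =>
    intro j x hx
    rw [pvOnes_cons] at hx
    rcases List.mem_append.mp hx with h | h
    · by_cases he : e = 1
      · simp [he] at h; subst h; simp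
      · simp [he] at h
    · have := ih (j + 1) x h; simp at this ⊢; omega

lemma pvOnes_append (xs : List Int) (x : Int) : ∀ j : Int,
    pvOnes j (xs ++ [x]) =
      pvOnes j xs ++ (if x == 1 then [j + (xs.length : Int)] else []) := by
  induction xs with
  | nil => intro j; by_cases h : x = 1 <;> simp [pvOnes, h]
  | cons e rest ih =>
    intro j
    rw [List.cons_append, pvOnes_cons, ih (j + 1), pvOnes_cons, List.append_assoc]
    have : j + 1 + (rest.length : Int) = j + ((rest.length : Int) + 1) := by ring
    simp [this]

lemma pvM_eq (col : List Int) :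
    (pvOnes 0 col).foldl max 0 =
      (if col.reverse.contains 1 then
        (col.length : Int) - 1 - (((PySem.List.index? col.reverse 1).getD 0 : Nat) : Int)
      else 0) := by
  induction col using List.reverseRecOn with
  | nil => simp [pvOnes]
  | append_singleton xs x ih =>
    rw [pvOnes_append, List.foldl_append, List.reverse_append]
    simp only [List.reverse_singleton, List.singleton_append]
    by_cases hx : x = 1
    · subst hx
      rw [PySem.List.index?_cons_self]
      have hle : (pvOnes 0 xs).foldl max 0 ≤ (xs.length : Int) := by
        rcases PySem.List.foldl_max_mem (pvOnes 0 xs) 0 with h | h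
        · rw [h]; positivity
        · have := pvOnes_mem_lt xs 0 _ h; omega
      simp [max_eq_right hle]
    · have hbeq : (x == (1:Int)) = false := by simp [hx]
      have hbx : ((1:Int) == x) = false := by
        simp only [beq_eq_false_iff_ne]; exact fun h => hx h.symm
      rw [PySem.List.index?_cons_of_ne xs.reverse hx, ih]
      simp only [hbeq, Bool.false_eq_true, if_false, List.foldl_nil,
        List.contains_cons, hbx, Bool.false_or]
      by_cases hm : (1 : Int) ∈ xs.reverse
      · obtain ⟨k, hk⟩ := Option.isSome_iff_exists.mp
          ((PySem.List.index?_isSome_iff xs.reverse 1).mpr hm)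
        have hcon : xs.reverse.contains 1 = true := by simpa using hm
        rw [hk]
        simp only [hcon, if_true, Option.map_some, Option.getD_some, List.length_append,
          List.length_cons, List.length_nil]
        push_cast
        ring
      · have hcon : xs.reverse.contains 1 = false := by simpa using hm
        have hnone : PySem.List.index? xs.reverse 1 = none := by
          rw [PySem.List.index?_eq_none_iff]; exact hm
        have hmx : (1:Int) ∉ xs := fun h => hm (List.mem_reverse.mpr h)
        rw [hnone]
        simp [hmx]

-- A's inner loop characterised: validity check plus running last-1 index
lemma pvA_scan_char (col : List Int) : ∀ (j i : Int), i ≤ j →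
    pvA_scan col j i =
      if col.all (fun e => e == 0 || e == 1) then some ((pvOnes j col).foldl max i) else none := by
  induction col with
  | nil => intro j i _; simp [pvA_scan, pvOnes]
  | cons e rest ih =>
    intro j i hij
    by_cases h1 : e = 1
    · subst h1
      rw [show pvA_scan (1 :: rest) j i = pvA_scan rest (j + 1) j from by simp [pvA_scan],
        ih (j + 1) j (by omega)]
      simp [pvOnes_cons, max_eq_right hij]
    · by_cases h0 : e = 0
      · subst h0
        rw [show pvA_scan (0 :: rest) j i = pvA_scan rest (j + 1) i from by simp [pvA_scan],
          ih (j + 1) i (by omega)]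
        simp [pvOnes_cons]
      · simp [pvA_scan, h1, h0]

-- the two per-column updates agree on every pivots list and every column
lemma pvStep_eq (p col : List Int) :
    (match pvA_scan col 0 0 with
      | some index => PySem.List.pySetD p index 1
      | none => p)
    = (if PySem.List.count col 0 + PySem.List.count col 1 == col.length then
        let rev := col.reverse
        let idx : Int := if rev.contains 1 then
            (col.length : Int) - 1 - (((PySem.List.index? rev 1).getD 0 : Nat) : Int)
          else 0
        PySem.List.pySetD p idx 1
      else p) := by
  rw [pvA_scan_char col 0 0 (le_refl 0)]
  simp only [PySem.List.count_eq, pvValid_iff]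
  by_cases h : col.all (fun e => e == 0 || e == 1) = true
  · simp only [h, if_true]
    rw [← pvM_eq]
  · simp [h]

-- ===== VERDICT (by name: the statement is the Claim_ definition above) =====
theorem pivot_rows_maker_spec : Claim_equal_pivot_rows_maker := by
  intro matrix cols _ _
  unfold Spec_pivot_rows_maker pivot_rows_maker pivot_rows_maker_alt
  rw [List.map_const']
  exact congrArg (fun f => List.foldl f (List.replicate matrix.length (0 : Int)) cols)
    (funext fun p => funext fun col => pvStep_eq p col)
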